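-- pv_equiv track=rewrite | github.com/ioanstoica/FMI | An_2/Sem_II/IA/ML/lab4/lab4.py | count_common_substrings
-- ===== SOURCE A (Python) =====
-- def count_common_substrings(list1, list2):
--     count = 0
--     for string1 in list1:
--         for i in range(len(string1) - 3):
--             sustring1=string1[i:i+3]
--             for string2 in list2:
--                 for j in range(len(string2) - 3):
--                     sustring2=string2[j:j+3]
--                     if sustring1==sustring2:
--                         count+=1
--                         break
--
--     return count
-- ===== SOURCE B (Python) =====
-- def count_common_substrings(list1, list2):
--     # Count, once per string of list2, how many strings of list2 contain each
--     # trigram (same i in range(len(s) - 3) windowing as the original).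
--     counts = {}
--     for s2 in list2:
--         for t in {s2[j:j + 3] for j in range(len(s2) - 3)}:
--             counts[t] = counts.get(t, 0) + 1
--     return sum(counts.get(s1[i:i + 3], 0)
--                for s1 in list1 for i in range(len(s1) - 3))
-- ===== Notes on version B (the rewrite author's own statement) =====
-- stated objective: faster
-- what changed: Replaced the four nested scans (every trigram of list1 rescanned against every trigram of every string of list2) with one pass building a dict trigram -> number of list2 strings containing it, then a single sum over list1's trigrams.
import Mathlib
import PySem

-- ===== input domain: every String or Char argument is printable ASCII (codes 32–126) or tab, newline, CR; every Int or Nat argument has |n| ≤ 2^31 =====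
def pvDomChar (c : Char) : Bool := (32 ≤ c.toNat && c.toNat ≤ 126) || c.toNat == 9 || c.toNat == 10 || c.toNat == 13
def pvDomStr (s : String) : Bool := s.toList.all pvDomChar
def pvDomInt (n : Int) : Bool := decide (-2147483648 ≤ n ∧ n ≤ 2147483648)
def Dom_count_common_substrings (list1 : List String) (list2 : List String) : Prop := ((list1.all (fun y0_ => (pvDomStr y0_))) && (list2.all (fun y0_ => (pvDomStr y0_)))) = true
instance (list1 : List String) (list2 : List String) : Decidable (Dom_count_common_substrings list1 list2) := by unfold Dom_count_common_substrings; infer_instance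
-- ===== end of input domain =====

-- B replaces A's four nested scans by a one-pass trigram→count dictionary over list2,
-- then a single sum over list1's trigrams (objective: faster, asymptotic).

-- ===== PORT A =====
-- inner 'for j in range(...): if sustring1 == sustring2: count += 1; break' — returns the amount added
def pvJloop (t : String) (s2 : String) : List Int → Int
  | [] => 0
  | j :: js =>
      if t == PySem.Str.slice s2 (some j) (some (j + 3)) then 1
      else pvJloop t s2 js

def count_common_substrings (list1 : List String) (list2 : List String) : Int :=
  list1.foldl (fun count string1 =>
    (PySem.List.pyRange 0 (PySem.Str.len string1 - 3) 1).foldl (fun count i =>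
      let sustring1 := PySem.Str.slice string1 (some i) (some (i + 3))
      list2.foldl (fun count string2 =>
        count + pvJloop sustring1 string2
          (PySem.List.pyRange 0 (PySem.Str.len string2 - 3) 1)) count) count) 0

-- ===== PORT B =====
-- [s[j:j+3] for j in range(len(s) - 3)]
def pvTrigrams (s : String) : List String :=
  (PySem.List.pyRange 0 (PySem.Str.len s - 3) 1).map
    (fun j => PySem.Str.slice s (some j) (some (j + 3)))

def count_common_substrings_alt (list1 : List String) (list2 : List String) : Int :=
  let counts : PySem.Dict String Int :=
    list2.foldl (fun d s2 =>
      (PySem.Set.ofList (pvTrigrams s2)).foldl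
        (fun d t => d.modify t 0 (fun x => x + 1)) d)
      PySem.Dict.empty
  list1.foldl (fun acc s1 =>
    (pvTrigrams s1).foldl (fun acc t => acc + counts.getD t 0) acc) 0

-- ===== PRECONDITION & SPEC =====
def Spec_count_common_substrings (list1 : List String) (list2 : List String) (out : Int) : Prop := out = count_common_substrings_alt list1 list2
instance (list1 : List String) (list2 : List String) (out : Int) : Decidable (Spec_count_common_substrings list1 list2 out) := by unfold Spec_count_common_substrings; infer_instance

-- ===== CLAIM (what is proved, stated in full; the proofs are below) =====
def Claim_equal_count_common_substrings : Prop := ∀ (list1 : List String) (list2 : List String), Dom_count_common_substrings list1 list2 → Spec_count_common_substrings list1 list2 (count_common_substrings list1 list2)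

-- ===== LEMMAS AND PROOFS =====

-- number of strings of list2 whose trigram list contains t
def pvHits (list2 : List String) (t : String) : Int :=
  (list2.map (fun s2 => if t ∈ pvTrigrams s2 then (1 : Int) else 0)).sum

theorem pvJloop_eq (t s2 : String) (js : List Int) :
    pvJloop t s2 js =
      if t ∈ js.map (fun j => PySem.Str.slice s2 (some j) (some (j + 3))) then 1 else 0 := by
  induction js with
  | nil => simp [pvJloop]
  | cons j js ih =>
      simp only [pvJloop, List.map_cons, List.mem_cons, ih]
      by_cases h : t = PySem.Str.slice s2 (some j) (some (j + 3)) <;> simp [h]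

theorem pvInner2 (t : String) (list2 : List String) (c : Int) :
    list2.foldl (fun c s2 =>
        c + pvJloop t s2 (PySem.List.pyRange 0 (PySem.Str.len s2 - 3) 1)) c =
      c + pvHits list2 t := by
  rw [PySem.List.foldl_add]
  unfold pvHits
  congr 1
  congr 1
  apply List.map_congr_left
  intro s2 _
  rw [pvJloop_eq]
  rfl

theorem pvMid (s1 : String) (list2 : List String) (c : Int) :
    (PySem.List.pyRange 0 (PySem.Str.len s1 - 3) 1).foldl (fun count i =>
        let sustring1 := PySem.Str.slice s1 (some i) (some (i + 3))
        list2.foldl (fun count string2 =>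
          count + pvJloop sustring1 string2
            (PySem.List.pyRange 0 (PySem.Str.len string2 - 3) 1)) count) c =
      c + ((pvTrigrams s1).map (pvHits list2)).sum := by
  simp only [pvInner2]
  rw [PySem.List.foldl_add]
  unfold pvTrigrams
  rw [List.map_map]
  rfl

theorem pvA_eq (list1 list2 : List String) :
    count_common_substrings list1 list2 =
      (list1.map (fun s1 => ((pvTrigrams s1).map (pvHits list2)).sum)).sum := by
  unfold count_common_substrings
  simp only [pvMid]
  rw [PySem.List.foldl_add]
  simp

theorem pvCounts_getD (list2 : List String) (d : PySem.Dict String Int) (t : String) :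
    (list2.foldl (fun d s2 =>
        (PySem.Set.ofList (pvTrigrams s2)).foldl
          (fun d t => d.modify t 0 (fun x => x + 1)) d) d).getD t 0 =
      d.getD t 0 + pvHits list2 t := by
  induction list2 generalizing d with
  | nil => simp [pvHits]
  | cons s2 rest ih =>
      rw [List.foldl_cons, ih, PySem.Dict.getD_foldl_modify_add_one]
      have hcnt : List.count t (PySem.Set.ofList (pvTrigrams s2)) =
          (if t ∈ pvTrigrams s2 then 1 else 0) := by
        by_cases h : t ∈ pvTrigrams s2
        · simp [h]
        · simp [h, List.count_eq_zero_of_not_mem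
            (fun hm => h ((PySem.Set.mem_ofList _ _).mp hm))]
      simp [pvHits, hcnt]
      ring

theorem pvOuterB (g : String → Int) (l : List String) (a : Int) :
    l.foldl (fun acc s1 => (pvTrigrams s1).foldl (fun acc t => acc + g t) acc) a =
      a + (l.map (fun s1 => ((pvTrigrams s1).map g).sum)).sum := by
  induction l generalizing a with
  | nil => simp
  | cons s1 rest ih =>
      rw [List.foldl_cons, ih, PySem.List.foldl_add]
      simp
      ring

theorem pvB_eq (list1 list2 : List String) :
    count_common_substrings_alt list1 list2 =
      (list1.map (fun s1 => ((pvTrigrams s1).map (pvHits list2)).sum)).sum := by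
  unfold count_common_substrings_alt
  rw [pvOuterB]
  simp only [pvCounts_getD]
  simp [PySem.Dict.getD, PySem.Dict.empty, PySem.Dict.get?]

-- ===== VERDICT (by name: the statement is the Claim_ definition above) =====
theorem count_common_substrings_spec : Claim_equal_count_common_substrings := by
  intro list1 list2 _
  unfold Spec_count_common_substrings
  rw [pvA_eq, pvB_eq]
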